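-- pv_equiv track=rewrite | github.com/zyclarkcheng/MediaEval-Competetion | parsing2vector.py | count_frame
-- ===== SOURCE A (Python) =====
-- def count_frame(one_vector, with_out_movie='', with_only_movie=''):
--     count_frame=0
--
--     for movie in one_vector:
--         if with_only_movie!='' and with_out_movie!='':
--             break
--         elif with_out_movie!= '' and movie != with_out_movie:
--             for frame in one_vector[movie]:
--                 count_frame+=1
--         elif with_only_movie!= ''and movie ==with_only_movie:
--             for frame in one_vector[movie]:
--                 count_frame+=1
--
--     return count_frame
-- ===== SOURCE B (Python) =====
-- def count_frame(one_vector, with_out_movie='', with_only_movie=''):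
--     # Dispatch on the flags once; the exclude case counts by subtraction from
--     # the grand total instead of filtering, so both cases are a single dict lookup.
--     if (with_out_movie != '') == (with_only_movie != ''):
--         return 0
--     if with_only_movie != '':
--         return len(one_vector.get(with_only_movie, []))
--     return sum(map(len, one_vector.values())) - len(one_vector.get(with_out_movie, []))
-- ===== Notes on version B (the rewrite author's own statement) =====
-- stated objective: alternative
-- what changed: B dispatches on the flags once up front and counts the exclude case by subtraction (grand total of all frames minus the excluded movie's direct lookup) instead of A's per-movie loop that re-tests both flags and filters/counts element by element; the include case is a single dict lookup.
import Mathlib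
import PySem

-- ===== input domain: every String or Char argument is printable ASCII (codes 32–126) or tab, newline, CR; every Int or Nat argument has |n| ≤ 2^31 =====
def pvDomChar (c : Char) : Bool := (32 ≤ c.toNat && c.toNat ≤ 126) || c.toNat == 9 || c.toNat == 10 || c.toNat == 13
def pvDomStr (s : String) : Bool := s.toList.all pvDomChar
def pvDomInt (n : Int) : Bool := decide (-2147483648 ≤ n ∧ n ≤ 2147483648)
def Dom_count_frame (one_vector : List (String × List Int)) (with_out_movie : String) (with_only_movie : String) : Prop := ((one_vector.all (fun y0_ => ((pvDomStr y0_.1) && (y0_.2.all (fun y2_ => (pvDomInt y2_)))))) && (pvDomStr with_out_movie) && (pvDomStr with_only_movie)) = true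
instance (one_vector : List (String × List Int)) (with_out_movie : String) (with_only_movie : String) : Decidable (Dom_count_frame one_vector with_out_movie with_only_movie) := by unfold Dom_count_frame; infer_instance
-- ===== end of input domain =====

-- B dispatches on the flags once and counts the exclude case by subtraction (total minus the excluded movie's lookup) instead of A's filtering per-movie loop; objective: alternative.


-- ===== PORT A =====
-- A's loop over the dict's movies, with the 'break' when both flags are set and
-- the inner 'for frame in one_vector[movie]: count_frame += 1' kept as a fold.
def count_frame_loopA (l : List (String × List Int)) (wo wi : String) (acc : Int) : Int :=
  match l with
  | [] => acc
  | (movie, frames) :: rest =>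
    if wi ≠ "" ∧ wo ≠ "" then acc            -- break
    else if wo ≠ "" ∧ movie ≠ wo then
      count_frame_loopA rest wo wi (frames.foldl (fun c _ => c + 1) acc)
    else if wi ≠ "" ∧ movie = wi then
      count_frame_loopA rest wo wi (frames.foldl (fun c _ => c + 1) acc)
    else count_frame_loopA rest wo wi acc

def count_frame (one_vector : List (String × List Int)) (with_out_movie : String) (with_only_movie : String) : Int :=
  count_frame_loopA one_vector with_out_movie with_only_movie 0

-- ===== PORT B =====
def count_frame_alt (one_vector : List (String × List Int)) (with_out_movie : String) (with_only_movie : String) : Int :=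
  if (decide (with_out_movie ≠ "")) = (decide (with_only_movie ≠ "")) then 0
  else if with_only_movie ≠ "" then
    ((one_vector.lookup with_only_movie).getD []).length
  else
    (one_vector.map (fun p => (p.2.length : Int))).sum
      - ((one_vector.lookup with_out_movie).getD []).length

-- ===== PRECONDITION & SPEC =====
-- Pre_ excludes association lists with duplicate movie keys: those do not represent
-- any Python dict (Python collapses duplicates before count_frame ever runs), and on
-- them A's full scan and B's first-match lookup accidentally differ.
def Pre_count_frame (one_vector : List (String × List Int)) (with_out_movie : String) (with_only_movie : String) : Prop :=
  (one_vector.map Prod.fst).Nodup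
instance (one_vector : List (String × List Int)) (with_out_movie : String) (with_only_movie : String) : Decidable (Pre_count_frame one_vector with_out_movie with_only_movie) := by unfold Pre_count_frame; infer_instance

def pvWitness_count_frame : (List (String × List Int)) × String × String :=
  ([("a", [1, 2]), ("b", [3])], "", "a")

def Spec_count_frame (one_vector : List (String × List Int)) (with_out_movie : String) (with_only_movie : String) (out : Int) : Prop := out = count_frame_alt one_vector with_out_movie with_only_movie
instance (one_vector : List (String × List Int)) (with_out_movie : String) (with_only_movie : String) (out : Int) : Decidable (Spec_count_frame one_vector with_out_movie with_only_movie out) := by unfold Spec_count_frame; infer_instance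

-- ===== CLAIM (what is proved, stated in full; the proofs are below) =====
def Claim_equal_count_frame : Prop := ∀ (one_vector : List (String × List Int)) (with_out_movie : String) (with_only_movie : String), Dom_count_frame one_vector with_out_movie with_only_movie → Pre_count_frame one_vector with_out_movie with_only_movie → Spec_count_frame one_vector with_out_movie with_only_movie (count_frame one_vector with_out_movie with_only_movie)

-- ===== LEMMAS AND PROOFS =====

-- the inner frame loop just adds the length
theorem foldl_add_one (frames : List Int) (acc : Int) :
    frames.foldl (fun c _ => c + 1) acc = acc + frames.length := by
  induction frames generalizing acc with
  | nil => simp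
  | cons f fs ih => simp [List.foldl, ih]; ring

-- both flags set: the loop breaks at once (or the list is empty)
theorem loopA_both (l : List (String × List Int)) (wo wi : String)
    (hwo : wo ≠ "") (hwi : wi ≠ "") : count_frame_loopA l wo wi 0 = 0 := by
  cases l with
  | nil => rfl
  | cons p rest =>
    obtain ⟨m, v⟩ := p
    simp [count_frame_loopA, hwo, hwi]

-- neither flag set: no branch ever fires
theorem loopA_neither (l : List (String × List Int)) (acc : Int) :
    count_frame_loopA l "" "" acc = acc := by
  induction l generalizing acc with
  | nil => rfl
  | cons p rest ih =>
    obtain ⟨m, v⟩ := p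
    simp [count_frame_loopA, ih]

-- a key absent from the list is not found by lookup
theorem lookup_absent (l : List (String × List Int)) (k : String)
    (habs : k ∉ l.map Prod.fst) : l.lookup k = none := by
  induction l with
  | nil => rfl
  | cons p rest ih =>
    obtain ⟨m, v⟩ := p
    simp only [List.map_cons, List.mem_cons, not_or] at habs
    have hbeq : (k == m) = false := by simp [habs.1]
    simp [List.lookup, hbeq, ih habs.2]

-- only the exclude flag set, keys nodup: the loop computes total minus the excluded movie
theorem loopA_excl (l : List (String × List Int)) (wo : String) (acc : Int)
    (hwo : wo ≠ "") (hnd : (l.map Prod.fst).Nodup) :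
    count_frame_loopA l wo "" acc
      = acc + (l.map (fun p => (p.2.length : Int))).sum
            - ((l.lookup wo).getD []).length := by
  induction l generalizing acc with
  | nil => simp [count_frame_loopA]
  | cons p rest ih =>
    obtain ⟨m, v⟩ := p
    simp only [List.map_cons, List.nodup_cons] at hnd
    by_cases hm : m = wo
    · subst hm
      have hrest : rest.lookup m = none := lookup_absent rest m hnd.1
      simp [count_frame_loopA, hwo, List.lookup, ih acc hnd.2, hrest]
      ring
    · have hbeq : (wo == m) = false := by simp [Ne.symm hm]
      simp [count_frame_loopA, hwo, hm, List.lookup, hbeq, foldl_add_one]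
      rw [ih _ hnd.2]; ring

-- only the include flag set and the key absent: the loop adds nothing
theorem loopA_incl_absent (l : List (String × List Int)) (wi : String) (acc : Int)
    (hwi : wi ≠ "") (habs : wi ∉ l.map Prod.fst) :
    count_frame_loopA l "" wi acc = acc := by
  induction l generalizing acc with
  | nil => rfl
  | cons p rest ih =>
    obtain ⟨m, v⟩ := p
    simp only [List.map_cons, List.mem_cons, not_or] at habs
    have hm : ¬ m = wi := fun h => habs.1 (h ▸ rfl)
    simp [count_frame_loopA, hwi, hm]
    exact ih acc habs.2

-- only the include flag set, keys nodup: the loop returns the lookup's length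
theorem loopA_incl (l : List (String × List Int)) (wi : String) (acc : Int)
    (hwi : wi ≠ "") (hnd : (l.map Prod.fst).Nodup) :
    count_frame_loopA l "" wi acc
      = acc + ((l.lookup wi).getD []).length := by
  induction l generalizing acc with
  | nil => simp [count_frame_loopA]
  | cons p rest ih =>
    obtain ⟨m, v⟩ := p
    simp only [List.map_cons, List.nodup_cons] at hnd
    by_cases hm : m = wi
    · subst hm
      simp [count_frame_loopA, hwi, List.lookup, foldl_add_one]
      exact loopA_incl_absent rest m _ hwi hnd.1
    · have hbeq : (wi == m) = false := by simp [Ne.symm hm]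
      simp [count_frame_loopA, hwi, hm, List.lookup, hbeq]
      exact ih acc hnd.2

-- ===== VERDICT (by name: the statement is the Claim_ definition above) =====
theorem count_frame_spec : Claim_equal_count_frame := by
  intro ov wo wi _ hpre
  unfold Spec_count_frame count_frame count_frame_alt
  by_cases hwo : wo = "" <;> by_cases hwi : wi = ""
  · subst hwo; subst hwi; simp [loopA_neither]
  · subst hwo; simp [hwi, loopA_incl ov wi 0 hwi hpre]
  · subst hwi; simp [hwo]; have := loopA_excl ov wo 0 hwo hpre; omega
  · simp [hwo, hwi, loopA_both ov wo wi hwo hwi]
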